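-- pv_equiv track=rewrite | github.com/theMPatel/portfolio | genomics_tools/genomics_tools/tools/fancy_tools.py | pretty_aln
-- ===== SOURCE A (Python) =====
-- def pretty_aln(a, b, wrap=70):
--     """
--     Takes two strings that are presumed to be the same length
--     and already aligned and creates a pretty output of the
--     sequences that's easier for a human to read.
--     Output would look like below:
--
--     >>> pretty_aln(string_a, string_b)
--     CCATGGTGACTCGGCGGTCTA
--     |||||||||| ||||||| ||
--     CCATGGTGACGCGGCGGTTTA
--
--     :param a: String to put on top.
--     :param b: String to put on bottom.
--     """
--
--     pipe_str = []
--     for x, y in zip(a,b):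
--
--         if x==y:
--             pipe_str.append('|')
--         else:
--             pipe_str.append(' ')
--
--     x = [a[i:i+wrap] for i in range(0, len(a), wrap)]
--     p = [pipe_str[i:i+wrap] for i in range(0, len(pipe_str), wrap)]
--     y = [b[i:i+wrap] for i in range(0, len(b), wrap)]
--
--     final = []
--
--     for combo in zip(x, p, y):
--
--         new_c = list(map(''.join, combo))
--         new_c = '\n'.join(new_c)
--         final.append(new_c)
--
--     return '\n\n'.join(final)
-- ===== SOURCE B (Python) =====
-- def pretty_aln(a, b, wrap=70):
--     blocks = []
--     for i in range(0, min(len(a), len(b)), wrap):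
--         ta = a[i:i+wrap]
--         tb = b[i:i+wrap]
--         mid = ''.join('|' if x == y else ' ' for x, y in zip(ta, tb))
--         blocks.append('\n'.join((ta, mid, tb)))
--     return '\n\n'.join(blocks)
-- ===== Notes on version B (the rewrite author's own statement) =====
-- stated objective: simpler
-- what changed: B renders the alignment block-by-block in one pass over range(0, min(len(a),len(b)), wrap), building top/pipes/bottom per block, instead of A's full pipe-list pass followed by three separate chunking comprehensions zipped together.
import Mathlib
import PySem

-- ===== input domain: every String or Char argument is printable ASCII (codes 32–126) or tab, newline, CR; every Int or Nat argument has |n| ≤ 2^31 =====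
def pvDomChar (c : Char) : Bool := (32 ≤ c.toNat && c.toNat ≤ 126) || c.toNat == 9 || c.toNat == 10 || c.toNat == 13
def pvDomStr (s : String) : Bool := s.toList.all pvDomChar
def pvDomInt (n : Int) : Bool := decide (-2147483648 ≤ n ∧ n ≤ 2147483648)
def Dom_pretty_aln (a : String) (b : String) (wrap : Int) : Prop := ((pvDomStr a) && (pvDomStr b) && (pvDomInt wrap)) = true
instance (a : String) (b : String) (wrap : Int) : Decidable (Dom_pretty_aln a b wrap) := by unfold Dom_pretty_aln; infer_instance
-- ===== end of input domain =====

-- B renders the alignment block-by-block in a single pass (simpler decomposition, same O(n) cost);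
-- return values are proved equal for every wrap ≠ 0.

-- ===== PORT A =====
-- literal transliteration of Source A: pipe list built by a loop over zip(a,b), then three
-- chunking comprehensions, then a loop over zip(x, p, y) joining each triple.
def pretty_aln (a : String) (b : String) (wrap : Int) : String :=
  let al := a.toList
  let bl := b.toList
  let pipe_str : List Char :=
    (al.zip bl).foldl (fun acc xy => acc ++ [if xy.1 == xy.2 then '|' else ' ']) []
  let x := (PySem.List.pyRange 0 (al.length : Int) wrap).map
      (fun i => PySem.List.slice al (some i) (some (i + wrap)))
  let p := (PySem.List.pyRange 0 (pipe_str.length : Int) wrap).map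
      (fun i => PySem.List.slice pipe_str (some i) (some (i + wrap)))
  let y := (PySem.List.pyRange 0 (bl.length : Int) wrap).map
      (fun i => PySem.List.slice bl (some i) (some (i + wrap)))
  let final : List (List Char) :=
    (x.zip (p.zip y)).foldl
      (fun acc c => acc ++ [PySem.Chars.join ['\n'] [c.1, c.2.1, c.2.2]]) []
  String.ofList (PySem.Chars.join ['\n', '\n'] final)

-- ===== PORT B =====
-- literal transliteration of Source B: one loop over range(0, min(len(a), len(b)), wrap),
-- each iteration builds the block's three lines directly.
def pretty_aln_alt (a : String) (b : String) (wrap : Int) : String :=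
  let al := a.toList
  let bl := b.toList
  let blocks : List (List Char) :=
    (PySem.List.pyRange 0 ((min al.length bl.length : Nat) : Int) wrap).foldl
      (fun acc i =>
        let ta := PySem.List.slice al (some i) (some (i + wrap))
        let tb := PySem.List.slice bl (some i) (some (i + wrap))
        let mid := (ta.zip tb).map (fun xy => if xy.1 == xy.2 then '|' else ' ')
        acc ++ [PySem.Chars.join ['\n'] [ta, mid, tb]]) []
  String.ofList (PySem.Chars.join ['\n', '\n'] blocks)

-- ===== PRECONDITION & SPEC =====
-- Pre_ excludes only wrap = 0, on which Python's range(0, len, 0) raises ValueError in A (and in B).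
def Pre_pretty_aln (a : String) (b : String) (wrap : Int) : Prop := wrap ≠ 0
instance (a : String) (b : String) (wrap : Int) : Decidable (Pre_pretty_aln a b wrap) := by
  unfold Pre_pretty_aln; infer_instance

def pvWitness_pretty_aln : String × String × Int := ("CCATGA", "CCGTGA", 4)

def Spec_pretty_aln (a : String) (b : String) (wrap : Int) (out : String) : Prop :=
  out = pretty_aln_alt a b wrap
instance (a : String) (b : String) (wrap : Int) (out : String) : Decidable (Spec_pretty_aln a b wrap out) := by
  unfold Spec_pretty_aln; infer_instance

-- ===== CLAIM (what is proved, stated in full; the proofs are below) =====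
def Claim_equal_pretty_aln : Prop := ∀ (a : String) (b : String) (wrap : Int),
  Dom_pretty_aln a b wrap → Pre_pretty_aln a b wrap → Spec_pretty_aln a b wrap (pretty_aln a b wrap)

-- ===== LEMMAS AND PROOFS =====

-- range(0, n, w) is empty for a negative step and a nonnegative stop
lemma pyRange_zero_nonneg_neg (n w : Int) (hn : 0 ≤ n) (hw : w < 0) :
    PySem.List.pyRange 0 n w = [] := by
  simp only [PySem.List.pyRange]
  rw [if_neg (by omega), if_neg (by omega), if_neg (by omega)]
  simp

-- the count of range(0, n, w) for 0 < w
def rangeCount (w n : Int) : Nat := if 0 < n then ((n + w - 1) / w).toNat else 0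

lemma pyRange_pos_eq (n w : Int) (hw : 0 < w) :
    PySem.List.pyRange 0 n w = (List.range (rangeCount w n)).map (fun (k : Nat) => w * (k : Int)) := by
  rw [PySem.List.pyRange_of_pos 0 n hw]
  unfold rangeCount
  simp only [sub_zero, zero_add]

lemma rangeCount_mono (w n1 n2 : Int) (hw : 0 < w) (h : n1 ≤ n2) :
    rangeCount w n1 ≤ rangeCount w n2 := by
  unfold rangeCount
  split_ifs with h1 h2
  · exact Int.toNat_le_toNat (Int.ediv_le_ediv hw (by omega))
  · omega
  · simp
  · simp

-- three zipped maps over ranges collapse to one map over the shortest range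
lemma zip3_map_range {α β γ : Type} (F : Nat → α) (G : Nat → β) (H : Nat → γ)
    (c1 c2 c3 : Nat) :
    (List.zip ((List.range c1).map F) (List.zip ((List.range c2).map G) ((List.range c3).map H)))
      = (List.range (min c1 (min c2 c3))).map (fun k => (F k, G k, H k)) := by
  apply List.ext_getElem
  · simp
  · intro i h1 h2
    simp [List.getElem_zip]

-- slicing the pipe list = mapping the pipe function over the zipped slices
lemma slice_pipe (al bl : List Char) (i w : Int) (hi : 0 ≤ i) (hiw : 0 ≤ i + w) :
    PySem.List.slice ((al.zip bl).map (fun xy => if xy.1 == xy.2 then '|' else ' '))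
        (some i) (some (i + w))
      = ((PySem.List.slice al (some i) (some (i + w))).zip
          (PySem.List.slice bl (some i) (some (i + w)))).map
          (fun xy => if xy.1 == xy.2 then '|' else ' ') := by
  rw [PySem.List.slice_toNat _ hi hiw, PySem.List.slice_toNat _ hi hiw,
      PySem.List.slice_toNat _ hi hiw]
  simp only [List.zip_eq_zipWith, List.map_zipWith, List.take_zipWith, List.drop_zipWith]

-- length of the pipe list
lemma pipe_length (al bl : List Char) :
    ((al.zip bl).map (fun xy => if xy.1 == xy.2 then '|' else ' ')).length
      = min al.length bl.length := by
  simp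

-- ===== VERDICT (by name: the statement is the Claim_ definition above) =====
theorem pretty_aln_spec : Claim_equal_pretty_aln := by
  intro a b wrap _ hpre
  unfold Spec_pretty_aln
  simp only [pretty_aln, pretty_aln_alt]
  set al := a.toList
  set bl := b.toList
  rw [PySem.List.foldl_append_singleton_eq_map
        (fun xy : Char × Char => if xy.1 == xy.2 then '|' else ' ') (al.zip bl) []]
  simp only [List.nil_append]
  rw [PySem.List.foldl_append_singleton_eq_map
        (fun c : List Char × (List Char × List Char) =>
          PySem.Chars.join ['\n'] [c.1, c.2.1, c.2.2])]
  rw [PySem.List.foldl_append_singleton_eq_map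
        (fun i : Int =>
          PySem.Chars.join ['\n']
            [PySem.List.slice al (some i) (some (i + wrap)),
             ((PySem.List.slice al (some i) (some (i + wrap))).zip
                (PySem.List.slice bl (some i) (some (i + wrap)))).map
                (fun xy => if xy.1 == xy.2 then '|' else ' '),
             PySem.List.slice bl (some i) (some (i + wrap))])]
  simp only [List.nil_append, pipe_length]
  rcases lt_trichotomy wrap 0 with hneg | hz | hpos
  · -- negative step: all ranges empty
    rw [pyRange_zero_nonneg_neg _ _ (by positivity) hneg,
        pyRange_zero_nonneg_neg _ _ (by positivity) hneg,
        pyRange_zero_nonneg_neg _ _ (by positivity) hneg]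
    simp
  · exact absurd hz hpre
  · -- positive step
    rw [pyRange_pos_eq _ _ hpos, pyRange_pos_eq _ _ hpos, pyRange_pos_eq _ _ hpos]
    rw [List.map_map, List.map_map, List.map_map, List.map_map]
    rw [zip3_map_range]
    have hmin : min (rangeCount wrap (al.length : Int))
        (min (rangeCount wrap ((min al.length bl.length : Nat) : Int))
             (rangeCount wrap (bl.length : Int)))
        = rangeCount wrap ((min al.length bl.length : Nat) : Int) := by
      have h1 := rangeCount_mono wrap ((min al.length bl.length : Nat) : Int)
        (al.length : Int) hpos (by simp)
      have h2 := rangeCount_mono wrap ((min al.length bl.length : Nat) : Int)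
        (bl.length : Int) hpos (by simp)
      omega
    rw [hmin, List.map_map]
    refine congrArg _ (congrArg _ (List.map_congr_left ?_))
    intro k _
    simp only [Function.comp_apply]
    have hk : (0:Int) ≤ wrap * (k:Int) := mul_nonneg hpos.le (Int.natCast_nonneg k)
    rw [slice_pipe al bl _ _ hk (by omega)]
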